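-- pv_equiv track=rewrite | github.com/syeed-mahmud/Autonomous-Exploration-System-for-Simulated-Volcanic-Terrain-Using-MDP | volcano_explorer/visualization.py | calculate_path_efficiency
-- ===== SOURCE A (Python) =====
-- def calculate_path_efficiency(path):
--     """Calculate various path efficiency metrics"""
--     if len(path) < 2:
--         return {'backtrack_steps': 0, 'loop_count': 0}
--
--     # Count backtracking
--     backtrack_steps = 0
--     for i in range(len(path) - 1):
--         if i > 0 and path[i] == path[i - 1]:
--             backtrack_steps += 1
--
--     # Count loops (revisiting same cell)
--     visited_count = {}
--     loop_count = 0
--     for pos in path: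
--         visited_count[pos] = visited_count.get(pos, 0) + 1
--         if visited_count[pos] > 1:
--             loop_count += 1
--
--     return {
--         'backtrack_steps': backtrack_steps,
--         'loop_count': loop_count
--     }
-- ===== SOURCE B (Python) =====
-- def calculate_path_efficiency(path):
--     """Calculate various path efficiency metrics"""
--     def adjacent_repeats(cells):
--         """Count entries equal to their predecessor."""
--         return sum(a == b for a, b in zip(cells, cells[1:]))
--     # Backtracks: adjacent repeats among all but the last cell.
--     # Loops: sorting groups duplicates, so every revisit of a cell
--     # becomes one adjacent repeat in the sorted order.
--     return {
--         'backtrack_steps': adjacent_repeats(path[:-1]),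
--         'loop_count': adjacent_repeats(sorted(path)),
--     }
-- ===== Notes on version B (the rewrite author's own statement) =====
-- stated objective: alternative
-- what changed: Replaces the per-element dict counter by sorting the path and counting adjacent repeats in the sorted order (duplicates become adjacent), and unifies both metrics as one adjacent-repeat scan applied to path[:-1] and to sorted(path); the len<2 guard disappears.
import Mathlib
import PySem

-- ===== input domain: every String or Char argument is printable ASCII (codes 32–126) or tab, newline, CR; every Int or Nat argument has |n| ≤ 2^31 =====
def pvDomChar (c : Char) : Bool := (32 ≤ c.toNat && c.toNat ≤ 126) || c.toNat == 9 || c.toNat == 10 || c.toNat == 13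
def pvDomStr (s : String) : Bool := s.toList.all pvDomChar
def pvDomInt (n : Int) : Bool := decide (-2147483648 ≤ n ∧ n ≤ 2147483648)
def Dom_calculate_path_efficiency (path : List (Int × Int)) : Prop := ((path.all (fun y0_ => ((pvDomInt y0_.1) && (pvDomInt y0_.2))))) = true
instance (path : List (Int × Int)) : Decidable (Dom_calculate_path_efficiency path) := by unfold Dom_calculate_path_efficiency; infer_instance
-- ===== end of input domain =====

-- B replaces A's dict counter by sort-then-adjacent-scan and computes both metrics with one
-- adjacent-repeat scan (on path[:-1] and on sorted(path)) (objective: alternative).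

-- ===== PORT A =====
-- Every index A uses is in range (i ∈ [0, n-2]; i-1 only read when i > 0), so pyGetD is exact here.
def calculate_path_efficiency (path : List (Int × Int)) : List (String × Int) :=
  if path.length < 2 then [("backtrack_steps", 0), ("loop_count", 0)]
  else
    let backtrack_steps : Int :=
      (PySem.List.pyRange 0 ((path.length : Int) - 1) 1).foldl
        (fun acc i =>
          if 0 < i ∧ PySem.List.pyGetD path i (0, 0) = PySem.List.pyGetD path (i - 1) (0, 0)
          then acc + 1 else acc) 0
    let st : PySem.Dict (Int × Int) Int × Int :=
      path.foldl
        (fun s pos =>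
          let d := s.1.insert pos (s.1.getD pos 0 + 1)
          (d, if d.getD pos 0 > 1 then s.2 + 1 else s.2))
        (PySem.Dict.empty, 0)
    [("backtrack_steps", backtrack_steps), ("loop_count", st.2)]

-- ===== PORT B =====
-- sum(a == b for a, b in zip(cells, cells[1:]))
def pvAdjRepeats (cells : List (Int × Int)) : Int :=
  ((cells.zip (PySem.List.slice cells (some 1) none)).countP (fun p => p.1 == p.2) : Int)

-- sorted(path) on pairs of ints is PySem.List.sorted2 with the two projections (lex order, Python's tuple order).
def calculate_path_efficiency_alt (path : List (Int × Int)) : List (String × Int) :=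
  [("backtrack_steps", pvAdjRepeats (PySem.List.slice path none (some (-1)))),
   ("loop_count", pvAdjRepeats (PySem.List.sorted2 path (fun c => c.1) (fun c => c.2) false))]

-- ===== PRECONDITION & SPEC =====
def Spec_calculate_path_efficiency (path : List (Int × Int)) (out : List (String × Int)) : Prop := out = calculate_path_efficiency_alt path
instance (path : List (Int × Int)) (out : List (String × Int)) : Decidable (Spec_calculate_path_efficiency path out) := by unfold Spec_calculate_path_efficiency; infer_instance

-- ===== CLAIM (what is proved, stated in full; the proofs are below) =====
def Claim_equal_calculate_path_efficiency : Prop := ∀ (path : List (Int × Int)), Dom_calculate_path_efficiency path → Spec_calculate_path_efficiency path (calculate_path_efficiency path)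

-- ===== LEMMAS AND PROOFS =====

-- Lexicographic order on pairs, Python's tuple order.
def pvLexLe (a b : Int × Int) : Prop := a.1 < b.1 ∨ (a.1 = b.1 ∧ a.2 ≤ b.2)

-- sorted2's comparator for the two projections.
def pvBef (a b : Int × Int) : Bool :=
  decide (a.1 < b.1) || (!decide (b.1 < a.1) && decide (a.2 < b.2))

theorem pvBef_true {a b : Int × Int} (h : pvBef a b = true) : pvLexLe a b := by
  rcases a with ⟨a1, a2⟩; rcases b with ⟨b1, b2⟩
  simp [pvBef] at h; unfold pvLexLe; simp only []; omega

theorem pvBef_false {a b : Int × Int} (h : pvBef a b = false) : pvLexLe b a := by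
  rcases a with ⟨a1, a2⟩; rcases b with ⟨b1, b2⟩
  simp [pvBef] at h; unfold pvLexLe; simp only []; omega

theorem pvLexLe_trans {a b c : Int × Int} (h1 : pvLexLe a b) (h2 : pvLexLe b c) : pvLexLe a c := by
  rcases a with ⟨a1, a2⟩; rcases b with ⟨b1, b2⟩; rcases c with ⟨c1, c2⟩
  unfold pvLexLe at *; simp only [] at *; omega

theorem pvLexLe_antisymm {a b : Int × Int} (h1 : pvLexLe a b) (h2 : pvLexLe b a) : a = b := by
  rcases a with ⟨a1, a2⟩; rcases b with ⟨b1, b2⟩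
  unfold pvLexLe at *; simp only [] at *
  have : a1 = b1 ∧ a2 = b2 := by omega
  simp [this.1, this.2]

theorem pairwise_insertBy (x : Int × Int) (l : List (Int × Int)) (h : l.Pairwise pvLexLe) :
    (PySem.List.insertBy pvBef x l).Pairwise pvLexLe := by
  induction l with
  | nil => simp [PySem.List.insertBy]
  | cons y ys ih =>
    rcases List.pairwise_cons.mp h with ⟨hy, hys⟩
    simp only [PySem.List.insertBy]
    by_cases hb : pvBef x y = true
    · simp only [hb, if_true]
      refine List.pairwise_cons.mpr ⟨?_, h⟩
      intro z hz
      rcases List.mem_cons.mp hz with rfl | hz'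
      · exact pvBef_true hb
      · exact pvLexLe_trans (pvBef_true hb) (hy z hz')
    · simp only [hb]
      simp only [Bool.false_eq_true, if_false]
      refine List.pairwise_cons.mpr ⟨?_, ih hys⟩
      intro z hz
      rcases (PySem.List.mem_insertBy _ _ _ _).mp hz with rfl | hz'
      · exact pvBef_false (Bool.eq_false_iff.mpr hb)
      · exact hy z hz'

theorem pairwise_foldl_insertBy (l acc : List (Int × Int)) (h : acc.Pairwise pvLexLe) :
    (l.foldl (fun acc x => PySem.List.insertBy pvBef x acc) acc).Pairwise pvLexLe := by
  induction l generalizing acc with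
  | nil => simpa using h
  | cons x t ih => exact ih _ (pairwise_insertBy x acc h)

theorem sorted2_pairwise_lex (xs : List (Int × Int)) :
    (PySem.List.sorted2 xs (fun c => c.1) (fun c => c.2) false).Pairwise pvLexLe := by
  have : PySem.List.sorted2 xs (fun c => c.1) (fun c => c.2) false
      = xs.foldl (fun acc x => PySem.List.insertBy pvBef x acc) [] := by
    rfl
  rw [this]
  exact pairwise_foldl_insertBy xs [] (by simp)

-- Adjacent-repeat count of a lex-sorted list: length minus number of distinct elements.
theorem countAdj_of_pairwise (m : List (Int × Int)) (h : m.Pairwise pvLexLe) :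
    ((m.zip m.tail).countP (fun p => p.1 == p.2)) + m.toFinset.card = m.length := by
  induction m with
  | nil => simp
  | cons x t iht =>
    cases t with
    | nil => simp
    | cons y u =>
      rcases List.pairwise_cons.mp h with ⟨hx, hyu⟩
      have ih := iht hyu
      simp only [List.tail_cons, List.zip_cons_cons, List.countP_cons] at *
      by_cases hxy : x = y
      · subst hxy
        have hmem : x ∈ (x :: u).toFinset := by simp
        rw [List.toFinset_cons, Finset.insert_eq_self.mpr hmem]
        have hle := (x :: u).toFinset_card_le
        simp only [List.length_cons] at *
        simp at ih ⊢
        omega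
      · have hnot : x ∉ y :: u := by
          intro hmem
          rcases List.mem_cons.mp hmem with h' | hu
          · exact hxy h'
          · exact hxy (pvLexLe_antisymm (hx y (by simp))
              ((List.pairwise_cons.mp hyu).1 x hu))
        have hcard : (x :: y :: u).toFinset.card = (y :: u).toFinset.card + 1 := by
          rw [List.toFinset_cons, Finset.card_insert_of_notMem (by simpa using hnot)]
        simp only [beq_iff_eq, if_neg hxy]
        simp only [List.length_cons] at *
        omega

theorem ofList_length_eq_toFinset_card (l : List (Int × Int)) :
    (PySem.Set.ofList l).length = l.toFinset.card := by
  have hnd : (PySem.Set.ofList l).Nodup := PySem.Set.nodup_ofList l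
  have hfs : (PySem.Set.ofList l).toFinset = l.toFinset := by
    ext z; simp [List.mem_toFinset, PySem.Set.mem_ofList]
  calc (PySem.Set.ofList l).length = (PySem.Set.ofList l).toFinset.card :=
        (List.toFinset_card_of_nodup hnd).symm
    _ = l.toFinset.card := by rw [hfs]

-- B's loop_count: the sorted adjacent-repeat count equals length minus distinct count.
theorem loop_alt_eq (path : List (Int × Int)) :
    pvAdjRepeats (PySem.List.sorted2 path (fun c => c.1) (fun c => c.2) false)
      = (path.length : Int) - ((PySem.Set.ofList path).length : Int) := by
  set s := PySem.List.sorted2 path (fun c => c.1) (fun c => c.2) false with hs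
  have hperm : s.Perm path := PySem.List.sorted2_perm path _ _ false
  have hcount := countAdj_of_pairwise s (sorted2_pairwise_lex path)
  have hlen : s.length = path.length := hperm.length_eq
  have hfin : s.toFinset = path.toFinset := by
    ext z; simp [List.mem_toFinset, hperm.mem_iff]
  unfold pvAdjRepeats
  rw [PySem.List.slice_from_one, ofList_length_eq_toFinset_card, ← hfin, ← hlen]
  omega

-- loop_count: A's insert-and-test fold computes length minus distinct count.
theorem loop_inv (l : List (Int × Int)) :
    (l.foldl
        (fun (s : PySem.Dict (Int × Int) Int × Int) pos =>
          let d := s.1.insert pos (s.1.getD pos 0 + 1)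
          (d, if d.getD pos 0 > 1 then s.2 + 1 else s.2))
        (PySem.Dict.empty, 0)) =
      (l.foldl (fun d x => d.insert x (d.getD x 0 + 1)) PySem.Dict.empty,
       (l.length : Int) - ((PySem.Set.ofList l).length : Int)) := by
  induction l using List.reverseRecOn with
  | nil => simp [PySem.Set.ofList]
  | append_singleton l x ih =>
    rw [List.foldl_append, List.foldl_append, ih]
    simp only [List.foldl_cons, List.foldl_nil]
    have hget : ((l.foldl (fun d x => d.insert x (d.getD x 0 + 1)) PySem.Dict.empty).insert x
        ((l.foldl (fun d x => d.insert x (d.getD x 0 + 1)) PySem.Dict.empty).getD x 0 + 1)).getD x 0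
        = (l.count x : Int) + 1 := by
      have := PySem.Dict.getD_foldl_insert_add_one (l := l ++ [x]) (d := PySem.Dict.empty) (v := x)
      simpa [List.foldl_append, List.count_append] using this
    rw [hget]
    rw [PySem.Set.ofList_append_singleton, PySem.Set.add_eq_ite]
    by_cases hx : x ∈ l
    · have : x ∈ PySem.Set.ofList l := by simpa [PySem.Set.mem_ofList] using hx
      have hc : (1 : Int) < (l.count x : Int) + 1 := by
        have := List.count_pos_iff.mpr hx
        omega
      simp [this, hc, List.length_append]
      ring
    · have : x ∉ PySem.Set.ofList l := by simpa [PySem.Set.mem_ofList] using hx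
      have hc : ¬ (1 : Int) < (l.count x : Int) + 1 := by
        have := List.count_eq_zero_of_not_mem hx
        omega
      simp [this, hc, List.length_append]

-- The adjacent pairs of path[:-1] are (path[j], path[j+1]) for j < n-2.
theorem zip_dropLast_eq_map_range (path : List (Int × Int)) :
    path.dropLast.zip path.dropLast.tail =
      (List.range (path.length - 2)).map (fun j => (path.getD j (0,0), path.getD (j+1) (0,0))) := by
  apply List.ext_getElem
  · simp [List.length_zip, List.length_dropLast, List.length_tail]
    omega
  · intro j h1 h2
    simp only [List.length_zip, List.length_dropLast, List.length_tail, List.length_map,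
      List.length_range] at h1 h2
    have hj : j < path.length - 2 := by omega
    have hj1 : j + 1 < path.length := by omega
    have hj0 : j < path.length := by omega
    have hjd : j < path.dropLast.length := by simp [List.length_dropLast]; omega
    have hjd1 : j + 1 < path.dropLast.length := by simp [List.length_dropLast]; omega
    simp [List.getElem_zip, List.getElem_map, List.getElem_range, List.getElem_tail,
      List.getElem_dropLast, hj1, hj0]

-- A's index loop counts the same pairs as B's adjacent scan of path[:-1].
theorem backtrack_eq (path : List (Int × Int)) (h2 : 2 ≤ path.length) :
    (PySem.List.pyRange 0 ((path.length : Int) - 1) 1).foldl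
        (fun acc i =>
          if 0 < i ∧ PySem.List.pyGetD path i (0, 0) = PySem.List.pyGetD path (i - 1) (0, 0)
          then acc + 1 else acc) 0 =
      pvAdjRepeats (PySem.List.slice path none (some (-1))) := by
  unfold pvAdjRepeats
  rw [PySem.List.slice_to_neg_one, PySem.List.slice_from_one, zip_dropLast_eq_map_range]
  rw [PySem.List.foldl_ite_add_one, PySem.List.pyRange_one, List.countP_map, List.countP_map]
  have hn : ((path.length : Int) - 1 - 0).toNat = (path.length - 2) + 1 := by omega
  rw [hn, List.range_succ_eq_map]
  rw [List.countP_cons, List.countP_map]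
  have hcongr : ∀ j ∈ List.range (path.length - 2),
      ((((fun x => decide (0 < x ∧ PySem.List.pyGetD path x (0, 0) = PySem.List.pyGetD path (x - 1) (0, 0))) ∘ fun k => (0 : Int) + ↑k) ∘ Nat.succ) j = true)
      ↔ (((fun p => p.1 == p.2) ∘ fun j => (path.getD j (0,0), path.getD (j+1) (0,0))) j = true) := by
    intro j hj
    simp only [List.mem_range] at hj
    simp only [Function.comp, Nat.succ_eq_add_one, decide_eq_true_eq, beq_iff_eq]
    rw [show ((0:Int) + ↑(j+1)) = ((j+1 : Nat) : Int) by push_cast; ring]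
    rw [show ((j+1:Nat):Int) - 1 = ((j:Nat):Int) by push_cast; ring]
    rw [PySem.List.pyGetD_natCast, PySem.List.pyGetD_natCast]
    constructor
    · exact fun h => h.2.symm
    · exact fun h => ⟨by positivity, h.symm⟩
  rw [List.countP_congr hcongr]
  simp

-- ===== VERDICT (by name: the statement is the Claim_ definition above) =====
theorem calculate_path_efficiency_spec : Claim_equal_calculate_path_efficiency := by
  intro path _
  unfold Spec_calculate_path_efficiency calculate_path_efficiency calculate_path_efficiency_alt
  by_cases h : path.length < 2
  · match path, h with
    | [], _ =>
      simp [pvAdjRepeats, PySem.List.slice, PySem.List.sorted2]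
    | [x], _ =>
      simp [pvAdjRepeats, PySem.List.slice, PySem.List.sorted2, PySem.List.insertBy]
    | _ :: _ :: _, h => simp at h
  · simp only [if_neg h]
    rw [loop_inv, backtrack_eq path (by omega), loop_alt_eq]
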